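-- pv_equiv track=rewrite | github.com/parven-dev/codewars | codewar/check_three_two.py | check_three_and_two
-- ===== SOURCE A (Python) =====
-- def check_three_and_two(array):
--     a =[]
--     b = []
--     c = []
--     for chars in array:
--         if chars == 'a':
--             a.append(chars)
--         if chars == "b":
--             b.append(chars)
--         if chars == "c":
--             c.append(chars)
--
--     if len(a) in [2, 3] or len(b) in [2, 3] or len(c) in [2, 3]:
--         return True
--     else:
--         return False
-- ===== SOURCE B (Python) =====
-- def check_three_and_two(array):
--     s = sorted(x for x in array if x in ('a', 'b', 'c'))
--     i, n = 0, len(s)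
--     while i < n:
--         j = i + 1
--         while j < n and s[j] == s[i]:
--             j += 1
--         if j - i in (2, 3):
--             return True
--         i = j
--     return False
-- ===== Notes on version B (the rewrite author's own statement) =====
-- stated objective: alternative
-- what changed: Replaces per-letter accumulation with a sort-then-scan: filter to 'a','b','c', sort, and scan maximal runs of equal elements, succeeding when a run of length 2 or 3 is found.
import Mathlib
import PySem

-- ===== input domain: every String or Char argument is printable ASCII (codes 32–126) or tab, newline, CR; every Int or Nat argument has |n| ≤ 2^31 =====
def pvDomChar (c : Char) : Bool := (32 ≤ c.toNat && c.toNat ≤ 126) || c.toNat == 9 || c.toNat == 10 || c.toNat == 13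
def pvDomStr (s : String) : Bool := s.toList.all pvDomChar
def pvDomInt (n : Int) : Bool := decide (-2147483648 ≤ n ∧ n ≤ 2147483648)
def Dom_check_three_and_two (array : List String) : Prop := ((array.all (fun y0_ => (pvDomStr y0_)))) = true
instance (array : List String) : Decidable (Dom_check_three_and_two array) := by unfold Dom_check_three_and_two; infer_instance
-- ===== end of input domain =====

-- B replaces A's per-letter accumulation with filter + sort + a scan of maximal equal runs; objective: alternative.

-- ===== PORT A =====
-- the loop body: three independent `if` statements appending to a, b, c
def pvStepA (acc : List String × List String × List String) (chars : String) :
    List String × List String × List String :=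
  let acc := if chars == "a" then (acc.1 ++ [chars], acc.2.1, acc.2.2) else acc
  let acc := if chars == "b" then (acc.1, acc.2.1 ++ [chars], acc.2.2) else acc
  if chars == "c" then (acc.1, acc.2.1, acc.2.2 ++ [chars]) else acc

def check_three_and_two (array : List String) : Bool :=
  let s := array.foldl pvStepA ([], [], [])
  if [2, 3].contains s.1.length || [2, 3].contains s.2.1.length || [2, 3].contains s.2.2.length then
    true
  else
    false

-- ===== PORT B =====
-- the outer while loop of Source B, one maximal run of equal elements per step:
-- the inner `while s[j] == s[i]` is the takeWhile, `i = j` is the dropWhile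
def pvRunScan : List String → Bool
  | [] => false
  | x :: xs =>
    let run := 1 + (xs.takeWhile (fun y => y == x)).length
    if run == 2 || run == 3 then true
    else pvRunScan (xs.dropWhile (fun y => y == x))
termination_by s => s.length
decreasing_by
  simp only [List.length_cons]
  exact Nat.lt_succ_of_le (List.length_dropWhile_le _ _)

def check_three_and_two_alt (array : List String) : Bool :=
  pvRunScan (PySem.List.sorted
    (array.filter (fun x => x == "a" || x == "b" || x == "c")) (fun x => x) false)

-- ===== PRECONDITION & SPEC =====
def Spec_check_three_and_two (array : List String) (out : Bool) : Prop := out = check_three_and_two_alt array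
instance (array : List String) (out : Bool) : Decidable (Spec_check_three_and_two array out) := by unfold Spec_check_three_and_two; infer_instance

-- ===== CLAIM =====
def Claim_equal_check_three_and_two : Prop := ∀ (array : List String), Dom_check_three_and_two array → Spec_check_three_and_two array (check_three_and_two array)

-- ===== LEMMAS AND PROOFS =====
theorem pvLoopA_eq (l : List String) (acc : List String × List String × List String) :
    l.foldl pvStepA acc =
      (acc.1 ++ l.filter (· == "a"), acc.2.1 ++ l.filter (· == "b"),
        acc.2.2 ++ l.filter (· == "c")) := by
  induction l generalizing acc with
  | nil => simp
  | cons x xs ih =>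
    simp only [List.foldl_cons, ih, List.filter_cons, pvStepA]
    by_cases ha : x == "a" <;> by_cases hb : x == "b" <;> by_cases hc : x == "c" <;>
      simp_all [List.append_assoc]

theorem pvTakeCount (x y : String) (xs : List String) :
    (xs.takeWhile (fun z => z == x)).count y =
      if y = x then (xs.takeWhile (fun z => z == x)).length else 0 := by
  have hall : ∀ z ∈ xs.takeWhile (fun z => z == x), z = x := by
    intro z hz
    simpa using List.mem_takeWhile_imp hz
  split_ifs with h
  · subst h
    rw [List.count_eq_length.2 (fun z hz => by simp [hall z hz])]
  · exact List.count_eq_zero.2 (fun hy => h (hall y hy))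

theorem pvDropNotMem (x : String) (xs : List String)
    (hs : (x :: xs).Pairwise (· ≤ ·)) : x ∉ xs.dropWhile (fun z => z == x) := by
  rcases List.pairwise_cons.1 hs with ⟨hx, hxs⟩
  cases hd : xs.dropWhile (fun z => z == x) with
  | nil => simp
  | cons z zs =>
    have hsub : (z :: zs).Sublist xs := hd ▸ (List.dropWhile_sublist _)
    have hzx : z ≠ x := by
      have h1 := List.head?_dropWhile_not (fun z => z == x) xs
      rw [hd] at h1
      intro he
      rw [List.head?_cons] at h1
      simp only [he] at h1
      exact absurd h1 (by simp)
    have hzmem : z ∈ xs := hsub.subset (by simp)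
    have hlt : x < z := lt_of_le_of_ne (hx z hzmem) (Ne.symm hzx)
    have hp : (z :: zs).Pairwise (· ≤ ·) := hxs.sublist hsub
    intro hmem
    rcases List.mem_cons.1 hmem with h | h
    · exact hzx h.symm
    · have := (List.pairwise_cons.1 hp).1 x h
      exact absurd (lt_of_lt_of_le hlt this) (lt_irrefl x)

theorem pvCountSplit (x y : String) (xs : List String) :
    (x :: xs).count y =
      (if y = x then 1 + (xs.takeWhile (fun z => z == x)).length else 0) +
        (xs.dropWhile (fun z => z == x)).count y := by
  conv_lhs => rw [← List.takeWhile_append_dropWhile (p := fun z => z == x) (l := xs)]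
  rw [show x :: (xs.takeWhile (fun z => z == x) ++ xs.dropWhile (fun z => z == x)) =
        (x :: xs.takeWhile (fun z => z == x)) ++ xs.dropWhile (fun z => z == x) from rfl,
      List.count_append, List.count_cons, pvTakeCount]
  by_cases h : y = x
  · simp [h, Nat.add_comm]
  · simp [h, Ne.symm h]

theorem pvRunScan_spec_aux (n : Nat) : ∀ (s : List String), s.length ≤ n →
    s.Pairwise (· ≤ ·) →
    (pvRunScan s = true ↔ ∃ y ∈ s, s.count y = 2 ∨ s.count y = 3) := by
  induction n with
  | zero =>
    intro s hlen _
    have : s = [] := List.eq_nil_of_length_eq_zero (Nat.le_zero.1 hlen)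
    subst this
    simp [pvRunScan]
  | succ n ih =>
    intro s hlen hs
    cases s with
    | nil => simp [pvRunScan]
    | cons x xs =>
      have hnotmem := pvDropNotMem x xs hs
      have hcx : (x :: xs).count x = 1 + (xs.takeWhile (fun z => z == x)).length := by
        rw [pvCountSplit x x xs, if_pos rfl, List.count_eq_zero.2 hnotmem]
        omega
      by_cases hcond : (1 + (xs.takeWhile (fun z => z == x)).length = 2 ∨
          1 + (xs.takeWhile (fun z => z == x)).length = 3)
      · have hscan : pvRunScan (x :: xs) = true := by
          rw [pvRunScan]
          simp only [Bool.or_eq_true, beq_iff_eq]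
          rw [if_pos (by simpa using hcond)]
        rw [hscan]
        simp only [true_iff]
        exact ⟨x, by simp, by rw [hcx]; exact hcond⟩
      · rcases List.pairwise_cons.1 hs with ⟨hx, hxs⟩
        have hsub : (xs.dropWhile (fun z => z == x)).Sublist xs := List.dropWhile_sublist _
        have hdsorted : (xs.dropWhile (fun z => z == x)).Pairwise (· ≤ ·) := hxs.sublist hsub
        have hdlen : (xs.dropWhile (fun z => z == x)).length ≤ n := by
          have := List.length_dropWhile_le (fun z => z == x) xs
          simp only [List.length_cons] at hlen
          omega
        have hscan : pvRunScan (x :: xs) = pvRunScan (xs.dropWhile (fun z => z == x)) := by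
          rw [pvRunScan]
          simp only [Bool.or_eq_true, beq_iff_eq]
          rw [if_neg (by simpa using hcond)]
        rw [hscan, ih _ hdlen hdsorted]
        constructor
        · rintro ⟨y, hy, hcnt⟩
          have hyx : y ≠ x := fun he => hnotmem (he ▸ hy)
          refine ⟨y, List.mem_cons_of_mem _ (hsub.subset hy), ?_⟩
          rw [pvCountSplit x y xs, if_neg hyx, Nat.zero_add]
          exact hcnt
        · rintro ⟨y, hy, hcnt⟩
          by_cases hyx : y = x
          · subst hyx
            rw [hcx] at hcnt
            exact absurd hcnt hcond
          · rw [pvCountSplit x y xs, if_neg hyx, Nat.zero_add] at hcnt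
            have hpos : 0 < (xs.dropWhile (fun z => z == x)).count y := by omega
            exact ⟨y, List.count_pos_iff.1 hpos, hcnt⟩

theorem pvRunScan_spec (s : List String) (hs : s.Pairwise (· ≤ ·)) :
    pvRunScan s = true ↔ ∃ y ∈ s, s.count y = 2 ∨ s.count y = 3 :=
  pvRunScan_spec_aux s.length s le_rfl hs

-- p-membership unpacks to the three letters
theorem pvMemF (y : String) (array : List String)
    (hy : y ∈ array.filter (fun x => x == "a" || x == "b" || x == "c")) :
    y = "a" ∨ y = "b" ∨ y = "c" := by
  have h := (List.mem_filter.1 hy).2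
  simp only [Bool.or_eq_true, beq_iff_eq] at h
  tauto

theorem pvCountS (array : List String) (y : String)
    (hp : (y == "a" || y == "b" || y == "c") = true) :
    (PySem.List.sorted (array.filter (fun x => x == "a" || x == "b" || x == "c"))
        (fun x => x) false).count y = array.count y := by
  rw [(PySem.List.sorted_perm _ _ _).count_eq]
  exact List.count_filter hp

-- ===== VERDICT =====
theorem check_three_and_two_spec : Claim_equal_check_three_and_two := by
  intro array _
  unfold Spec_check_three_and_two check_three_and_two check_three_and_two_alt
  rw [pvLoopA_eq]
  simp only [List.nil_append]
  have hfa : (List.filter (· == "a") array).length = array.count "a" :=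
    List.countP_eq_length_filter.symm
  have hfb : (List.filter (· == "b") array).length = array.count "b" :=
    List.countP_eq_length_filter.symm
  have hfc : (List.filter (· == "c") array).length = array.count "c" :=
    List.countP_eq_length_filter.symm
  have hs : (PySem.List.sorted (array.filter (fun x => x == "a" || x == "b" || x == "c"))
      (fun x => x) false).Pairwise (· ≤ ·) :=
    PySem.List.sorted_pairwise _ (fun x => x)
  have hbig : (∃ y ∈ PySem.List.sorted
        (array.filter (fun x => x == "a" || x == "b" || x == "c")) (fun x => x) false,
        (PySem.List.sorted (array.filter (fun x => x == "a" || x == "b" || x == "c"))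
          (fun x => x) false).count y = 2 ∨
        (PySem.List.sorted (array.filter (fun x => x == "a" || x == "b" || x == "c"))
          (fun x => x) false).count y = 3) ↔
      (((array.count "a" = 2 ∨ array.count "a" = 3) ∨
        (array.count "b" = 2 ∨ array.count "b" = 3)) ∨
        (array.count "c" = 2 ∨ array.count "c" = 3)) := by
    constructor
    · rintro ⟨y, hy, hcnt⟩
      have hyf : y ∈ array.filter (fun x => x == "a" || x == "b" || x == "c") :=
        (PySem.List.sorted_perm _ _ _).mem_iff.1 hy
      have h3 := pvMemF y array hyf
      have hp : (y == "a" || y == "b" || y == "c") = true := by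
        rcases h3 with h | h | h <;> simp [h]
      rw [pvCountS array y hp] at hcnt
      rcases h3 with h | h | h <;> subst h <;> tauto
    · intro hC
      have key : ∃ y, (y == "a" || y == "b" || y == "c") = true ∧
          (array.count y = 2 ∨ array.count y = 3) := by
        rcases hC with (h | h) | h
        · exact ⟨"a", by decide, h⟩
        · exact ⟨"b", by decide, h⟩
        · exact ⟨"c", by decide, h⟩
      rcases key with ⟨y, hp, hcnt⟩
      have hcs := pvCountS array y hp
      exact ⟨y, List.count_pos_iff.1 (by rw [hcs]; omega), by rw [hcs]; exact hcnt⟩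
  have hcond : ([2, 3].contains (List.filter (· == "a") array).length ||
      [2, 3].contains (List.filter (· == "b") array).length ||
      [2, 3].contains (List.filter (· == "c") array).length) = true ↔
      (((array.count "a" = 2 ∨ array.count "a" = 3) ∨
        (array.count "b" = 2 ∨ array.count "b" = 3)) ∨
        (array.count "c" = 2 ∨ array.count "c" = 3)) := by
    simp [List.contains_eq_mem, hfa, hfb, hfc]
  split_ifs with h
  · exact ((pvRunScan_spec _ hs).2 (hbig.2 (hcond.1 h))).symm
  · have hC : ¬ (((array.count "a" = 2 ∨ array.count "a" = 3) ∨
        (array.count "b" = 2 ∨ array.count "b" = 3)) ∨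
        (array.count "c" = 2 ∨ array.count "c" = 3)) := fun hx => h (hcond.2 hx)
    have hne : pvRunScan (PySem.List.sorted
        (array.filter (fun x => x == "a" || x == "b" || x == "c")) (fun x => x) false) ≠ true :=
      fun hr => hC (hbig.1 ((pvRunScan_spec _ hs).1 hr))
    exact (Bool.eq_false_iff.2 hne).symm
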